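-- pv_equiv track=rewrite | github.com/oluatomi/TimetableGUI_project | models/Tt_algo_calc.py | nth_suffix
-- ===== SOURCE A (Python) =====
-- def nth_suffix(num):
--     """ Function to determine the appropriate english suffix to a number as in 1st, 2nd and so on.
--     Floats will be converted to INT  """
--
--     # Just to be super sure
--     num = int(num)
--     suffix_dict = {"0":"th", "1":"st", "2":"nd", "3":"rd"}
--     suffix_dict.update({str(n):"th" for n in range(4, 14) if n != 10})
--
--     num_str = str(num)
--
--     if num_str[-2:] in suffix_dict:
--         suffix_ = suffix_dict[num_str[-2:]]
--     else:
--         suffix_ = suffix_dict[num_str[-1]]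
--     return num_str + suffix_
-- ===== SOURCE B (Python) =====
-- def nth_suffix(num):
--     """Ordinal suffix via modular arithmetic instead of a suffix dictionary."""
--     num = int(num)
--     n = abs(num)
--     r = n % 100
--     if 11 <= r <= 13:
--         suffix = "th"
--     elif n % 10 == 1:
--         suffix = "st"
--     elif n % 10 == 2:
--         suffix = "nd"
--     elif n % 10 == 3:
--         suffix = "rd"
--     else:
--         suffix = "th"
--     return str(num) + suffix
-- ===== Notes on version B (the rewrite author's own statement) =====
-- stated objective: idiomatic
-- what changed: Replaces the string-keyed suffix dictionary and the str-slice lookups by modular arithmetic on abs(num): 'th' for the teens, otherwise st/nd/rd/th chosen by the last digit.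
import Mathlib
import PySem

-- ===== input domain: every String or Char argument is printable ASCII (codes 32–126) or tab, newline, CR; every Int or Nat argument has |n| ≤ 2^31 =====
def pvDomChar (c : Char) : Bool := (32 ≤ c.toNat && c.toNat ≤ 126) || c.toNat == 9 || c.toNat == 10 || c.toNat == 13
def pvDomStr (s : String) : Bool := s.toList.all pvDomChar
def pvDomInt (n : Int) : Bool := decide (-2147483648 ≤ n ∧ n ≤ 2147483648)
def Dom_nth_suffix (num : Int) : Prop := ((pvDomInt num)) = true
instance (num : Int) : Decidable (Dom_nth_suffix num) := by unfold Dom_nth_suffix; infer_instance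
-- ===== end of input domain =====

-- B drops A's suffix dictionary and string slicing for modular arithmetic on |num| (idiomatic, same cost).

-- ===== PORT A =====
-- Strings are handled on the List Char side (PySem convention); str(num) = PySem.Int.toChars num.
def nth_suffix (num : Int) : String :=
  -- num = int(num) : identity on an Int argument
  let suffix_dict : PySem.Dict (List Char) (List Char) :=
    PySem.Dict.ofList [(['0'], ['t','h']), (['1'], ['s','t']), (['2'], ['n','d']), (['3'], ['r','d'])]
  -- suffix_dict.update({str(n): "th" for n in range(4, 14) if n != 10})
  let suffix_dict :=
    (PySem.List.pyRange 4 14 1).foldl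
      (fun d n => if n ≠ 10 then d.insert (PySem.Int.toChars n) ['t','h'] else d) suffix_dict
  let num_str := PySem.Int.toChars num
  let suffix_ : List Char :=
    if suffix_dict.contains (PySem.List.slice num_str (some (-2)) none) then
      (suffix_dict.get? (PySem.List.slice num_str (some (-2)) none)).getD []
    else
      match PySem.List.pyGet? num_str (-1) with
      | some c => (suffix_dict.get? [c]).getD []   -- the last char of str(num) is a digit, always a key
      | none => []                                 -- unreachable: str(num) is never empty
  String.ofList (num_str ++ suffix_)

-- ===== PORT B =====
def nth_suffix_alt (num : Int) : String :=
  let n : Int := |num|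
  let r : Int := PySem.Int.mod n 100
  let suffix : List Char :=
    if 11 ≤ r ∧ r ≤ 13 then ['t','h']
    else if PySem.Int.mod n 10 = 1 then ['s','t']
    else if PySem.Int.mod n 10 = 2 then ['n','d']
    else if PySem.Int.mod n 10 = 3 then ['r','d']
    else ['t','h']
  String.ofList (PySem.Int.toChars num ++ suffix)

-- ===== PRECONDITION & SPEC =====
def Spec_nth_suffix (num : Int) (out : String) : Prop := out = nth_suffix_alt num
instance (num : Int) (out : String) : Decidable (Spec_nth_suffix num out) := by unfold Spec_nth_suffix; infer_instance

-- ===== CLAIM (what is proved, stated in full; the proofs are below) =====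
def Claim_equal_nth_suffix : Prop := ∀ (num : Int), Dom_nth_suffix num → Spec_nth_suffix num (nth_suffix num)

-- ===== LEMMAS AND PROOFS =====

-- the fully-built suffix dictionary, as a literal
def pvDict : PySem.Dict (List Char) (List Char) :=
  PySem.Dict.ofList [(['0'], ['t','h']), (['1'], ['s','t']), (['2'], ['n','d']), (['3'], ['r','d']),
    (['4'], ['t','h']), (['5'], ['t','h']), (['6'], ['t','h']), (['7'], ['t','h']),
    (['8'], ['t','h']), (['9'], ['t','h']),
    (['1','1'], ['t','h']), (['1','2'], ['t','h']), (['1','3'], ['t','h'])]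

set_option maxRecDepth 100000 in
lemma pvDict_eq :
    (PySem.List.pyRange 4 14 1).foldl
      (fun d n => if n ≠ 10 then d.insert (PySem.Int.toChars n) ['t','h'] else d)
      (PySem.Dict.ofList [(['0'], ['t','h']), (['1'], ['s','t']), (['2'], ['n','d']), (['3'], ['r','d'])])
      = pvDict := by decide

-- A's suffix read off the last one/two digit characters, as a function of the digits
def pvSufA (tens ones : Nat) : List Char :=
  if pvDict.contains [Nat.digitChar tens, Nat.digitChar ones] then
    (pvDict.get? [Nat.digitChar tens, Nat.digitChar ones]).getD []
  else (pvDict.get? [Nat.digitChar ones]).getD []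

-- B's suffix as a function of |num| % 100
def pvSufB (r : Nat) : List Char :=
  if 11 ≤ r ∧ r ≤ 13 then ['t','h']
  else if r % 10 = 1 then ['s','t']
  else if r % 10 = 2 then ['n','d']
  else if r % 10 = 3 then ['r','d']
  else ['t','h']

set_option maxRecDepth 100000 in
lemma pvSufA_eq_pvSufB : ∀ r : Nat, r < 100 → pvSufA (r / 10) (r % 10) = pvSufB r := by decide

set_option maxRecDepth 100000 in
lemma pvSufA_single : ∀ m : Nat, m < 10 →
    (pvDict.get? [Nat.digitChar m]).getD [] = pvSufB m := by decide

-- str(|num|) for |num| ≥ 10 ends in its last two digit characters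
lemma pvToDigits_two (m : Nat) (h : 10 ≤ m) :
    ∃ t, Nat.toDigits 10 m = t ++ [Nat.digitChar (m / 10 % 10), Nat.digitChar (m % 10)] := by
  rw [Nat.toDigits_of_base_le (by norm_num) h]
  rcases lt_or_ge (m / 10) 10 with h' | h'
  · refine ⟨[], ?_⟩
    rw [Nat.toDigits_of_lt_base h', Nat.mod_eq_of_lt h']
    simp
  · refine ⟨Nat.toDigits 10 (m / 10 / 10), ?_⟩
    rw [Nat.toDigits_of_base_le (by norm_num) h']
    simp

-- ===== VERDICT (by name: the statement is the Claim_ definition above) =====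
theorem nth_suffix_spec : Claim_equal_nth_suffix := by
  intro num _
  unfold Spec_nth_suffix nth_suffix nth_suffix_alt
  simp only [pvDict_eq]
  set m : Nat := num.natAbs with hm
  have habs : |num| = (m : Int) := by rw [hm]; exact (Int.abs_eq_natAbs num)
  have h100 : PySem.Int.mod (|num|) 100 = ((m % 100 : Nat) : Int) := by
    rw [habs, PySem.Int.mod_eq_emod_of_pos (by norm_num)]
    omega
  have h10 : PySem.Int.mod (|num|) 10 = ((m % 10 : Nat) : Int) := by
    rw [habs, PySem.Int.mod_eq_emod_of_pos (by norm_num)]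
    omega
  -- reduce B's branch chain to pvSufB (m % 100)
  have hB : (if 11 ≤ PySem.Int.mod (|num|) 100 ∧ PySem.Int.mod (|num|) 100 ≤ 13 then ['t','h']
      else if PySem.Int.mod (|num|) 10 = 1 then ['s','t']
      else if PySem.Int.mod (|num|) 10 = 2 then ['n','d']
      else if PySem.Int.mod (|num|) 10 = 3 then ['r','d']
      else ['t','h']) = pvSufB (m % 100) := by
    rw [h100, h10, pvSufB]
    have hmm : m % 10 = m % 100 % 10 := (Nat.mod_mod_of_dvd m (by norm_num)).symm
    rw [← hmm]
    split_ifs with h1 h2 h3 h4 h5 h6 h7 h8 h9 <;> first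
      | rfl
      | (exfalso; omega)
  rw [hB]
  refine congrArg String.ofList (congrArg (PySem.Int.toChars num ++ ·) ?_)
  -- now the A-side suffix
  have hchars : PySem.Int.toChars num =
      (if num < 0 then ['-'] else []) ++ Nat.toDigits 10 m := by
    unfold PySem.Int.toChars
    split_ifs with h
    · rfl
    · have hnn : num.toNat = num.natAbs := by omega
      rw [hnn]
      simp [hm]
  rcases lt_or_ge m 10 with hlt | hge
  · -- |num| < 10 : str(num) is one digit char, possibly after '-'
    have hd : Nat.toDigits 10 m = [Nat.digitChar m] := Nat.toDigits_of_lt_base (by omega)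
    have hr : m % 100 = m := Nat.mod_eq_of_lt (by omega)
    rw [hchars, hd, hr]
    by_cases hneg : num < 0
    · -- key "-d" is not in the dict; fall back to the last char
      simp only [if_pos hneg]
      rw [show (['-'] ++ [Nat.digitChar m] : List Char) = ['-', Nat.digitChar m] by rfl]
      rw [PySem.List.slice_from_neg_ofNat _ 2 (by norm_num)]
      simp only [List.length_cons, List.length_nil]
      rw [show (2 - 2 : Nat) = 0 by rfl, List.drop_zero]
      have hnc : pvDict.contains ['-', Nat.digitChar m] = false := by
        interval_cases m <;> decide
      rw [hnc]
      simp only [Bool.false_eq_true, if_false]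
      rw [PySem.List.pyGet?_neg_one]
      simp only [List.getLast?_cons_cons, List.getLast?_singleton]
      exact pvSufA_single m hlt
    · simp only [if_neg hneg, List.nil_append]
      rw [PySem.List.slice_from_neg_ofNat _ 2 (by norm_num)]
      simp only [List.length_cons, List.length_nil]
      rw [show (1 - 2 : Nat) = 0 by rfl, List.drop_zero]
      have hc : pvDict.contains [Nat.digitChar m] = true := by
        interval_cases m <;> decide
      rw [hc, if_pos rfl]
      exact pvSufA_single m hlt
  · -- |num| ≥ 10 : the last two chars are the digits of m % 100
    obtain ⟨t, ht⟩ := pvToDigits_two m hge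
    have hdiv : m / 10 % 10 = m % 100 / 10 := by omega
    have hmod : m % 10 = m % 100 % 10 := (Nat.mod_mod_of_dvd m (by norm_num)).symm
    have hkey : PySem.List.slice (PySem.Int.toChars num) (some (-2)) none
        = [Nat.digitChar (m % 100 / 10), Nat.digitChar (m % 100 % 10)] := by
      rw [PySem.List.slice_from_neg_ofNat _ 2 (by norm_num), hchars, ht, hdiv, hmod]
      by_cases hneg : num < 0
      · simp only [if_pos hneg]
        rw [show (['-'] ++ (t ++ [Nat.digitChar (m % 100 / 10), Nat.digitChar (m % 100 % 10)]) : List Char)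
            = '-' :: (t ++ [Nat.digitChar (m % 100 / 10), Nat.digitChar (m % 100 % 10)]) by rfl]
        simp only [List.length_cons, List.length_append, List.length_cons, List.length_nil]
        rw [show t.length + (0 + 1 + 1) + 1 - 2 = t.length + 1 by omega, List.drop_succ_cons]
        simp
      · simp only [if_neg hneg, List.nil_append]
        simp
    have hlast : PySem.List.pyGet? (PySem.Int.toChars num) (-1)
        = some (Nat.digitChar (m % 100 % 10)) := by
      rw [PySem.List.pyGet?_neg_one, hchars, ht, hmod]
      by_cases hneg : num < 0
      · rw [if_pos hneg, List.getLast?_append]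
        simp
      · rw [if_neg hneg, List.getLast?_append]
        simp
    rw [hkey, hlast]
    have := pvSufA_eq_pvSufB (m % 100) (Nat.mod_lt m (by norm_num))
    unfold pvSufA at this
    rw [← this]
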